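-- pv_equiv track=rewrite | github.com/NikK4886/MyCoding | JavaCoding/Code for ITI.py/A3_300437395/a3_part2_30043795.py | encrypt
-- ===== SOURCE A (Python) =====
-- def encrypt(s):
--     '''(string)->string
--     Returns a string that is an encrypted version of the given string
--     Precondition: s must be a string'''
--
--     ans = ""
--     RevS = ""
--     x = 0
--     y = 0
--     for i in range(len(s)):
--         RevS = s[i] + RevS
--
--     for i in range(len(s)):
--         if((i+1)%2 == 1):
--             ans = ans + RevS[x]
--             x += 1
--
--         else:
--             ans = ans + s[y]
--             y += 1
--
--
--
--
--     return ans
-- ===== SOURCE B (Python) =====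
-- def encrypt(s):
--     '''(string)->string
--     Returns a string that is an encrypted version of the given string
--     Precondition: s must be a string'''
--     n = len(s)
--     out = []
--     for i in range(n):
--         j = i // 2
--         out.append(s[n - 1 - j] if i % 2 == 0 else s[j])
--     return "".join(out)
-- ===== Notes on version B (the rewrite author's own statement) =====
-- stated objective: faster
-- what changed: B drops A's reversed-string precompute and incremental x/y counters and quadratic string concatenation: one pass over range(len(s)) indexes s directly, using s[n-1-i//2] on even i and s[i//2] on odd i, collected in a list joined once.
import Mathlib
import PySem

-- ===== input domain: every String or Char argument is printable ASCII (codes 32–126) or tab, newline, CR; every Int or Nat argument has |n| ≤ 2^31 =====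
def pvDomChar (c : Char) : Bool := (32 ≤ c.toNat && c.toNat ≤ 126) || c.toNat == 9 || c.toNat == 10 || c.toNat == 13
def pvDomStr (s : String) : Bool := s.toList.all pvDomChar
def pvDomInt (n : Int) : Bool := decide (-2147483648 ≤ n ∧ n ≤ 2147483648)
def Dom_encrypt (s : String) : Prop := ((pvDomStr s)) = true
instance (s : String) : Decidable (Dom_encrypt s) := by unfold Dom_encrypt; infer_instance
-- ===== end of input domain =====

-- B replaces A's reversed-string precompute + counter interleave with one direct-indexing pass (simpler).

-- ===== PORT A =====
-- all string indices are Nat and provably in range, so getD is exact here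
def encrypt (s : String) : String :=
  let cs := s.toList
  let revS := cs.foldl (fun acc c => c :: acc) ([] : List Char)   -- RevS = s[i] + RevS
  let r := (List.range cs.length).foldl
    (fun (st : List Char × Nat × Nat) i =>
      if (i + 1) % 2 == 1 then
        (st.1 ++ [revS.getD st.2.1 ' '], st.2.1 + 1, st.2.2)
      else
        (st.1 ++ [cs.getD st.2.2 ' '], st.2.1, st.2.2 + 1))
    ([], 0, 0)
  String.ofList r.1

-- ===== PORT B =====
def encrypt_alt (s : String) : String :=
  let cs := s.toList
  let n := cs.length
  String.ofList <| (List.range n).map fun i =>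
    if i % 2 == 0 then cs.getD (n - 1 - i / 2) ' ' else cs.getD (i / 2) ' '

-- ===== PRECONDITION & SPEC =====
def Spec_encrypt (s : String) (out : String) : Prop := out = encrypt_alt s
instance (s : String) (out : String) : Decidable (Spec_encrypt s out) := by unfold Spec_encrypt; infer_instance

-- ===== CLAIM (what is proved, stated in full; the proofs are below) =====
def Claim_equal_encrypt : Prop := ∀ (s : String), Dom_encrypt s → Spec_encrypt s (encrypt s)

-- ===== LEMMAS AND PROOFS =====

theorem pv_foldl_cons_rev (cs : List Char) (acc : List Char) :
    cs.foldl (fun a c => c :: a) acc = cs.reverse ++ acc := by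
  induction cs generalizing acc with
  | nil => simp
  | cons c t ih => simp [ih]

theorem pv_getD_reverse (l : List Char) (j : Nat) (h : j < l.length) (d : Char) :
    l.reverse.getD j d = l.getD (l.length - 1 - j) d := by
  rw [List.getD_eq_getElem?_getD, List.getD_eq_getElem?_getD, List.getElem?_reverse h]

theorem pv_loopA (cs : List Char) (k : Nat) :
    (List.range k).foldl
      (fun (st : List Char × Nat × Nat) i =>
        if (i + 1) % 2 == 1 then
          (st.1 ++ [cs.reverse.getD st.2.1 ' '], st.2.1 + 1, st.2.2)
        else
          (st.1 ++ [cs.getD st.2.2 ' '], st.2.1, st.2.2 + 1))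
      ([], 0, 0)
    = ((List.range k).map (fun i =>
        if (i + 1) % 2 == 1 then cs.reverse.getD (i / 2) ' ' else cs.getD (i / 2) ' '),
       (k + 1) / 2, k / 2) := by
  induction k with
  | zero => simp
  | succ k ih =>
    rw [List.range_succ, List.foldl_append, ih, List.map_append]
    rcases Nat.even_or_odd k with hk | hk
    · obtain ⟨m, rfl⟩ := hk
      have h1 : (m + m + 1) % 2 = 1 := by omega
      simp only [List.foldl_cons, List.foldl_nil, List.map_cons, List.map_nil, h1]
      simp only [beq_iff_eq, if_true]
      rw [show (m + m + 1) / 2 = (m + m) / 2 from by omega]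
      simp only [Prod.mk.injEq]
      refine ⟨?_, ?_, ?_⟩ <;> first | trivial | omega
    · obtain ⟨m, rfl⟩ := hk
      have h1 : (2 * m + 1 + 1) % 2 = 0 := by omega
      simp only [List.foldl_cons, List.foldl_nil, List.map_cons, List.map_nil, h1]
      simp only [beq_iff_eq]
      rw [if_neg (by omega), if_neg (by omega)]
      simp only [Prod.mk.injEq]
      refine ⟨?_, ?_, ?_⟩ <;> first | trivial | omega

-- ===== VERDICT (by name: the statement is the Claim_ definition above) =====
theorem encrypt_spec : Claim_equal_encrypt := by
  intro s _
  unfold Spec_encrypt encrypt encrypt_alt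
  simp only [pv_foldl_cons_rev, List.append_nil, pv_loopA]
  congr 1
  apply List.map_congr_left
  intro i hi
  have hin : i < s.toList.length := List.mem_range.mp hi
  rcases Nat.even_or_odd i with h | h
  · obtain ⟨m, rfl⟩ := h
    have h1 : (m + m + 1) % 2 = 1 := by omega
    have h2 : (m + m) % 2 = 0 := by omega
    simp only [h1, h2, beq_self_eq_true, if_true]
    rw [pv_getD_reverse _ _ (by omega)]
  · obtain ⟨m, rfl⟩ := h
    have h1 : (2 * m + 1 + 1) % 2 = 0 := by omega
    have h2 : (2 * m + 1) % 2 = 1 := by omega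
    simp [h1, h2]
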